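-- pv_equiv track=rewrite | github.com/rod-meaney/SenseHatSmiley | icons.py | bar_graph
-- ===== SOURCE A (Python) =====
-- import math
--
-- def bar_graph(r,y,g):
--     G = (0, 255, 0)
--     Y = (255, 255, 0)
--     R = (255, 0, 0)
--     N = (0,0,0)
--
--     lista = [r,y,g]
--     div = (math.trunc(max(lista)/16)+1) #Largest divisor of 16
--
--     r=int(round((r)/div))
--     y=int(round((y)/div))
--     g=int(round((g)/div))
--
--     display = []
--     sad=[57,56,49,48,41,40,33,32,25,24,17,16,9,8,1,0]
--     meh=[60,59,52,51,44,43,36,35,28,27,20,19,12,11,4,3]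
--     happy=[63,62,55,54,47,46,39,38,31,30,23,22,15,14,7,6]
--     #Set to blank
--     for x in range (0,64):
--         display.append(N)
--     #sad
--     for x in range (0,r):
--         display[sad[x]] = R
--     #meh
--     for x in range (0,y):
--         display[meh[x]] = Y
--     #happy
--     for x in range (0,g):
--         display[happy[x]] = G
--     return display
-- ===== SOURCE B (Python) =====
-- import math
--
-- def bar_graph(r, y, g):
--     G = (0, 255, 0)
--     Y = (255, 255, 0)
--     R = (255, 0, 0)
--     N = (0, 0, 0)
--     div = math.trunc(max(r, y, g) / 16) + 1
--     bars = [(int(round(r / div)), R), (int(round(y / div)), Y), (int(round(g / div)), G)]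
--     display = []
--     for i in range(64):
--         row, col = divmod(i, 8)
--         if col == 2 or col == 5:
--             display.append(N)
--             continue
--         cnt, color = bars[col // 3]
--         rank = (7 - row) * 2 + (3 * (col // 3) + 1 - col)
--         display.append(color if rank < cnt else N)
--     return display
-- ===== Notes on version B (the rewrite author's own statement) =====
-- stated objective: alternative
-- what changed: Same scaling (div = trunc(max/16)+1, counts = round(v/div)), but the 64-cell display is built in one pass mapping each linear index to its bar and bottom-up fill rank, instead of A's blank-init append loop plus three hard-coded index-table overwrite loops; Pre_ excludes triples with max <= -16, where the divisor becomes nonpositive and A raises on almost all inputs (on the rare deeply negative triples there where all bars fit and A returns, B returns the identical list).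
import Mathlib
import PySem

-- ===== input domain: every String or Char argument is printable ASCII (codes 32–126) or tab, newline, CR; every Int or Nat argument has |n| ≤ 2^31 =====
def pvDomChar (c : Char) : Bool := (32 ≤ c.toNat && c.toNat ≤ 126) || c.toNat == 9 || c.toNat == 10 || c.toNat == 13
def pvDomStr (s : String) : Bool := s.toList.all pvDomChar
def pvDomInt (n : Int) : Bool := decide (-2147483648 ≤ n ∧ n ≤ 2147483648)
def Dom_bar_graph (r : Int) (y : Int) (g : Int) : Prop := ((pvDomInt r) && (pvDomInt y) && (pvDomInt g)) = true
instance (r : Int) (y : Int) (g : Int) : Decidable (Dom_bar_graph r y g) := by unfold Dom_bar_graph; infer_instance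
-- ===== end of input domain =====

-- B builds the 64-cell display in ONE pass over the linear index (column → bar, fill rank from
-- the bottom) instead of A's blank-init pass plus three index-table overwrite loops; objective: alternative decomposition.

-- ===== PORT A =====

-- int(round(n/d)): exact integer round-half-even of the rational n/d (d > 0).  Exact vs CPython's
-- float round(n/d) on the admitted domain: |n| ≤ 2^31 and d ≥ 1 give |n/d|·d ≤ 2^32 < 2^52, so the
-- double n/d never reaches or crosses a half-integer the rational n/d is not already on.
def pvRoundDiv (n d : Int) : Int :=
  let q := PySem.Int.floordiv n d
  let rem := PySem.Int.mod n d
  if 2 * rem < d then q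
  else if d < 2 * rem then q + 1
  else if q % 2 == 0 then q else q + 1

def pvSad : List Int := [57,56,49,48,41,40,33,32,25,24,17,16,9,8,1,0]
def pvMeh : List Int := [60,59,52,51,44,43,36,35,28,27,20,19,12,11,4,3]
def pvHappy : List Int := [63,62,55,54,47,46,39,38,31,30,23,22,15,14,7,6]

-- math.trunc(max(lista)/16) = truncdiv m 16 exactly, since |m| ≤ 2^31 < 2^53 and /16 is a float
-- division by a power of two.  display[idx] = color is List.set: under Pre_ every written index is
-- 0..63 and x is 0..15, matching Python's in-range list assignment.
def bar_graph (r : Int) (y : Int) (g : Int) : List (Int × Int × Int) :=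
  let Gc : Int × Int × Int := (0, 255, 0)
  let Yc : Int × Int × Int := (255, 255, 0)
  let Rc : Int × Int × Int := (255, 0, 0)
  let Nc : Int × Int × Int := (0, 0, 0)
  let lista : List Int := [r, y, g]
  let div := PySem.Int.truncdiv ((PySem.List.max? lista (fun x => x)).getD 0) 16 + 1
  let r1 := pvRoundDiv r div
  let y1 := pvRoundDiv y div
  let g1 := pvRoundDiv g div
  let display : List (Int × Int × Int) := (PySem.List.pyRange 0 64 1).foldl (fun d _ => d ++ [Nc]) []
  let display := (PySem.List.pyRange 0 r1 1).foldl (fun d x => d.set (PySem.List.pyGetD pvSad x 0).toNat Rc) display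
  let display := (PySem.List.pyRange 0 y1 1).foldl (fun d x => d.set (PySem.List.pyGetD pvMeh x 0).toNat Yc) display
  let display := (PySem.List.pyRange 0 g1 1).foldl (fun d x => d.set (PySem.List.pyGetD pvHappy x 0).toNat Gc) display
  display

-- ===== PORT B =====

-- one pass over i = 0..63; i and divmod(i, 8) are nonnegative, so Nat / and % match Python's divmod
def bar_graph_alt (r : Int) (y : Int) (g : Int) : List (Int × Int × Int) :=
  let Gc : Int × Int × Int := (0, 255, 0)
  let Yc : Int × Int × Int := (255, 255, 0)
  let Rc : Int × Int × Int := (255, 0, 0)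
  let Nc : Int × Int × Int := (0, 0, 0)
  let div := PySem.Int.truncdiv (max r (max y g)) 16 + 1
  let bars : List (Int × (Int × Int × Int)) :=
    [(pvRoundDiv r div, Rc), (pvRoundDiv y div, Yc), (pvRoundDiv g div, Gc)]
  (List.range 64).map (fun i =>
    let row := i / 8
    let col := i % 8
    if col == 2 || col == 5 then Nc
    else
      let bar := bars.getD (col / 3) (0, Nc)
      let rank := (7 - row) * 2 + (3 * (col / 3) + 1 - col)
      if (rank : Int) < bar.1 then bar.2 else Nc)

-- ===== PRECONDITION & SPEC =====
-- Pre_ excludes inputs whose maximum is ≤ -16: there the divisor trunc(max/16)+1 becomes ≤ 0 and A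
-- raises ZeroDivisionError or IndexError on almost all of them; the rare deeply negative triples on
-- which every bar still scales to at most 16 cells (so A returns, and B returns the same list) are
-- excluded together with them.
def Pre_bar_graph (r : Int) (y : Int) (g : Int) : Prop := -15 ≤ max r (max y g)
instance (r : Int) (y : Int) (g : Int) : Decidable (Pre_bar_graph r y g) := by unfold Pre_bar_graph; infer_instance
def pvWitness_bar_graph : Int × Int × Int := (3, 2, 1)

def Spec_bar_graph (r : Int) (y : Int) (g : Int) (out : List (Int × Int × Int)) : Prop := out = bar_graph_alt r y g
instance (r : Int) (y : Int) (g : Int) (out : List (Int × Int × Int)) : Decidable (Spec_bar_graph r y g out) := by unfold Spec_bar_graph; infer_instance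

-- ===== CLAIM (what is proved, stated in full; the proofs are below) =====
def Claim_equal_bar_graph : Prop := ∀ (r : Int) (y : Int) (g : Int), Dom_bar_graph r y g → Pre_bar_graph r y g → Spec_bar_graph r y g (bar_graph r y g)

-- ===== LEMMAS AND PROOFS =====

-- counts clamped to 0..16, the only range that matters (negative counts fill nothing)
def pvClamp (c : Int) : Nat := (min c 16).toNat

-- A's overwrite loop, normalized to a Nat-counted fold
def pvFill (idxs : List Int) (color : Int × Int × Int) (n : Nat) (d : List (Int × Int × Int)) : List (Int × Int × Int) :=
  (List.range n).foldl (fun d k => d.set (idxs.getD k 0).toNat color) d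

def pvA (a b c : Nat) : List (Int × Int × Int) :=
  pvFill pvHappy (0, 255, 0) c (pvFill pvMeh (255, 255, 0) b (pvFill pvSad (255, 0, 0) a (List.replicate 64 (0, 0, 0))))

-- B's cell, normalized to Nat counts
def pvCell (a b c : Nat) (i : Nat) : Int × Int × Int :=
  let row := i / 8
  let col := i % 8
  if col == 2 || col == 5 then (0, 0, 0)
  else
    let cnt := [a, b, c].getD (col / 3) 0
    let color := [((255:Int), (0:Int), (0:Int)), (255, 255, 0), (0, 255, 0)].getD (col / 3) (0, 0, 0)
    let rank := (7 - row) * 2 + (3 * (col / 3) + 1 - col)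
    if rank < cnt then color else (0, 0, 0)

def pvB (a b c : Nat) : List (Int × Int × Int) := (List.range 64).map (pvCell a b c)

theorem pv_max_eq (r y g : Int) : (PySem.List.max? [r, y, g] (fun x => x)).getD 0 = max r (max y g) := by
  rw [PySem.List.max?_id_cons]
  simp [List.foldl, max_assoc]

theorem pv_div_facts (m : Int) (hm : -15 ≤ m) :
    0 < PySem.Int.truncdiv m 16 + 1 ∧ m < 16 * (PySem.Int.truncdiv m 16 + 1) := by
  show 0 < m.tdiv 16 + 1 ∧ m < 16 * (m.tdiv 16 + 1)
  by_cases h : 0 ≤ m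
  · rw [Int.tdiv_eq_ediv_of_nonneg h]; omega
  · have h : m < 0 := by omega
    have hm0 : m.tdiv 16 = 0 := by
      have he : m = -(-m) := by ring
      rw [he, Int.neg_tdiv, Int.tdiv_eq_ediv_of_nonneg (by omega)]
      omega
    omega

theorem pv_round_le (v d : Int) (hd : 0 < d) (hv : v < 16 * d) : pvRoundDiv v d ≤ 16 := by
  have hq : PySem.Int.floordiv v d < 16 := (PySem.Int.floordiv_lt_iff_lt_mul hd).mpr (by omega)
  unfold pvRoundDiv
  dsimp only
  split_ifs <;> omega

-- ----- A side: steps -----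

theorem pv_fill_succ (idxs : List Int) (color : Int × Int × Int) (n : Nat) (d : List (Int × Int × Int)) :
    pvFill idxs color (n + 1) d = (pvFill idxs color n d).set (idxs.getD n 0).toNat color := by
  simp [pvFill, List.range_succ]

theorem pv_fill_set_comm (idxs : List Int) (color v : Int × Int × Int) (n j : Nat)
    (h : ∀ k, k < n → (idxs.getD k 0).toNat ≠ j) (d : List (Int × Int × Int)) :
    pvFill idxs color n (d.set j v) = (pvFill idxs color n d).set j v := by
  induction n with
  | zero => rfl
  | succ n ih =>
    rw [pv_fill_succ, pv_fill_succ, ih (fun k hk => h k (by omega))]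
    exact List.set_comm _ _ (Ne.symm (h n (by omega)))


theorem pv_sad_idx : ∀ a, a < 16 → (pvSad.getD a 0).toNat = 8 * (7 - a / 2) + (1 - a % 2) := by decide
theorem pv_meh_idx : ∀ b, b < 16 → (pvMeh.getD b 0).toNat = 8 * (7 - b / 2) + (4 - b % 2) := by decide
theorem pv_happy_idx : ∀ c, c < 16 → (pvHappy.getD c 0).toNat = 8 * (7 - c / 2) + (7 - c % 2) := by decide
theorem pv_ne_MS : ∀ k, k < 16 → ∀ a, a < 16 → (pvMeh.getD k 0).toNat ≠ 8 * (7 - a / 2) + (1 - a % 2) := by decide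
theorem pv_ne_HS : ∀ k, k < 16 → ∀ a, a < 16 → (pvHappy.getD k 0).toNat ≠ 8 * (7 - a / 2) + (1 - a % 2) := by decide
theorem pv_ne_HM : ∀ k, k < 16 → ∀ b, b < 16 → (pvHappy.getD k 0).toNat ≠ 8 * (7 - b / 2) + (4 - b % 2) := by decide

theorem pv_stepAR (a b c : Nat) (ha : a < 16) (hb : b ≤ 16) (hc : c ≤ 16) :
    pvA (a + 1) b c = (pvA a b c).set (8 * (7 - a / 2) + (1 - a % 2)) (255, 0, 0) := by
  unfold pvA
  rw [pv_fill_succ, pv_sad_idx a ha,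
    pv_fill_set_comm _ _ _ _ _ (fun k hk => pv_ne_MS k (by omega) a ha),
    pv_fill_set_comm _ _ _ _ _ (fun k hk => pv_ne_HS k (by omega) a ha)]

theorem pv_stepAY (a b c : Nat) (hb : b < 16) (hc : c ≤ 16) :
    pvA a (b + 1) c = (pvA a b c).set (8 * (7 - b / 2) + (4 - b % 2)) (255, 255, 0) := by
  unfold pvA
  rw [pv_fill_succ, pv_meh_idx b hb,
    pv_fill_set_comm _ _ _ _ _ (fun k hk => pv_ne_HM k (by omega) b hb)]

theorem pv_stepAG (a b c : Nat) (hc : c < 16) :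
    pvA a b (c + 1) = (pvA a b c).set (8 * (7 - c / 2) + (7 - c % 2)) (0, 255, 0) := by
  unfold pvA
  rw [pv_fill_succ, pv_happy_idx c hc]

-- ----- B side: steps -----

theorem pv_stepBR (a b c : Nat) (ha : a < 16) :
    pvB (a + 1) b c = (pvB a b c).set (8 * (7 - a / 2) + (1 - a % 2)) (255, 0, 0) := by
  apply List.ext_getElem (by simp [pvB])
  intro i hi1 hi2
  have hi : i < 64 := by simpa [pvB] using hi1
  simp only [pvB, List.getElem_map, List.getElem_range]
  rw [List.getElem_set]
  have h8 : i % 8 < 8 := Nat.mod_lt _ (by omega)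
  have hcol : i % 8 = 0 ∨ i % 8 = 1 ∨ i % 8 = 2 ∨ i % 8 = 3 ∨ i % 8 = 4 ∨ i % 8 = 5 ∨ i % 8 = 6 ∨ i % 8 = 7 := by omega
  rcases hcol with h | h | h | h | h | h | h | h <;>
    simp only [pvCell, h] <;> norm_num <;> simp only [pvCell, h] <;> norm_num <;>
      first | rfl | omega | (split_ifs <;> first | rfl | omega)

theorem pv_stepBY (a b c : Nat) (hb : b < 16) :
    pvB a (b + 1) c = (pvB a b c).set (8 * (7 - b / 2) + (4 - b % 2)) (255, 255, 0) := by
  apply List.ext_getElem (by simp [pvB])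
  intro i hi1 hi2
  have hi : i < 64 := by simpa [pvB] using hi1
  simp only [pvB, List.getElem_map, List.getElem_range]
  rw [List.getElem_set]
  have h8 : i % 8 < 8 := Nat.mod_lt _ (by omega)
  have hcol : i % 8 = 0 ∨ i % 8 = 1 ∨ i % 8 = 2 ∨ i % 8 = 3 ∨ i % 8 = 4 ∨ i % 8 = 5 ∨ i % 8 = 6 ∨ i % 8 = 7 := by omega
  rcases hcol with h | h | h | h | h | h | h | h <;>
    simp only [pvCell, h] <;> norm_num <;> simp only [pvCell, h] <;> norm_num <;>
      first | rfl | omega | (split_ifs <;> first | rfl | omega)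

theorem pv_stepBG (a b c : Nat) (hc : c < 16) :
    pvB a b (c + 1) = (pvB a b c).set (8 * (7 - c / 2) + (7 - c % 2)) (0, 255, 0) := by
  apply List.ext_getElem (by simp [pvB])
  intro i hi1 hi2
  have hi : i < 64 := by simpa [pvB] using hi1
  simp only [pvB, List.getElem_map, List.getElem_range]
  rw [List.getElem_set]
  have h8 : i % 8 < 8 := Nat.mod_lt _ (by omega)
  have hcol : i % 8 = 0 ∨ i % 8 = 1 ∨ i % 8 = 2 ∨ i % 8 = 3 ∨ i % 8 = 4 ∨ i % 8 = 5 ∨ i % 8 = 6 ∨ i % 8 = 7 := by omega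
  rcases hcol with h | h | h | h | h | h | h | h <;>
    simp only [pvCell, h] <;> norm_num <;> simp only [pvCell, h] <;> norm_num <;>
      first | rfl | omega | (split_ifs <;> first | rfl | omega)

theorem pv_fin : ∀ a b c : Nat, a ≤ 16 → b ≤ 16 → c ≤ 16 → pvA a b c = pvB a b c := by
  intro a
  induction a with
  | zero =>
    intro b
    induction b with
    | zero =>
      intro c
      induction c with
      | zero => intro _ _ _; decide
      | succ c ihc =>
        intro _ _ hc
        rw [pv_stepAG 0 0 c (by omega), pv_stepBG 0 0 c (by omega), ihc (by omega) (by omega) (by omega)]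
    | succ b ihb =>
      intro c _ hb hc
      rw [pv_stepAY 0 b c (by omega) hc, pv_stepBY 0 b c (by omega), ihb c (by omega) (by omega) hc]
  | succ a iha =>
    intro b c ha hb hc
    rw [pv_stepAR a b c (by omega) hb hc, pv_stepBR a b c (by omega), iha b c (by omega) hb hc]

-- ----- normalization of the two ports -----

theorem pv_blank : (PySem.List.pyRange 0 64 1).foldl
    (fun (d : List (Int × Int × Int)) _ => d ++ [(0, 0, 0)]) [] = List.replicate 64 (0, 0, 0) := by
  decide

theorem pv_loop (idxs : List Int) (color : Int × Int × Int) (d : List (Int × Int × Int)) (c : Int) (hc : c ≤ 16) :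
    (PySem.List.pyRange 0 c 1).foldl (fun d x => d.set (PySem.List.pyGetD idxs x 0).toNat color) d
      = pvFill idxs color (pvClamp c) d := by
  have hn : (c - 0).toNat = pvClamp c := by unfold pvClamp; omega
  rw [PySem.List.pyRange_one, hn, List.foldl_map]
  simp only [zero_add, PySem.List.pyGetD_natCast]
  rfl

theorem pv_A_norm (r y g : Int) (d : Int)
    (hd : d = PySem.Int.truncdiv (max r (max y g)) 16 + 1)
    (h1 : pvRoundDiv r d ≤ 16) (h2 : pvRoundDiv y d ≤ 16) (h3 : pvRoundDiv g d ≤ 16) :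
    bar_graph r y g = pvA (pvClamp (pvRoundDiv r d)) (pvClamp (pvRoundDiv y d)) (pvClamp (pvRoundDiv g d)) := by
  simp only [bar_graph, pv_max_eq, ← hd]
  rw [pv_blank, pv_loop _ _ _ _ h1, pv_loop _ _ _ _ h2, pv_loop _ _ _ _ h3]
  rfl

theorem pv_B_norm (r y g : Int) (d : Int)
    (hd : d = PySem.Int.truncdiv (max r (max y g)) 16 + 1)
    (h1 : pvRoundDiv r d ≤ 16) (h2 : pvRoundDiv y d ≤ 16) (h3 : pvRoundDiv g d ≤ 16) :
    bar_graph_alt r y g = pvB (pvClamp (pvRoundDiv r d)) (pvClamp (pvRoundDiv y d)) (pvClamp (pvRoundDiv g d)) := by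
  apply List.ext_getElem (by simp [bar_graph_alt, pvB])
  intro i hi _
  simp only [bar_graph_alt, pvB, List.getElem_map, List.getElem_range, ← hd] at hi ⊢
  have h8 : i % 8 < 8 := Nat.mod_lt _ (by omega)
  have hcol : i % 8 = 0 ∨ i % 8 = 1 ∨ i % 8 = 2 ∨ i % 8 = 3 ∨ i % 8 = 4 ∨ i % 8 = 5 ∨ i % 8 = 6 ∨ i % 8 = 7 := by omega
  rcases hcol with h | h | h | h | h | h | h | h <;>
    simp only [pvCell, h] <;> norm_num <;> split_ifs <;>
      first | rfl | (exfalso; unfold pvClamp at *; omega)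

-- ===== VERDICT (by name: the statement is the Claim_ definition above) =====
theorem bar_graph_spec : Claim_equal_bar_graph := by
  intro r y g _hD hP
  unfold Spec_bar_graph
  obtain ⟨hdpos, hlt⟩ := pv_div_facts (max r (max y g)) hP
  have h1 := pv_round_le r _ hdpos (lt_of_le_of_lt (le_max_left _ _) hlt)
  have h2 := pv_round_le y _ hdpos (lt_of_le_of_lt (le_trans (le_max_left _ _) (le_max_right _ _)) hlt)
  have h3 := pv_round_le g _ hdpos (lt_of_le_of_lt (le_trans (le_max_right _ _) (le_max_right _ _)) hlt)
  rw [pv_A_norm r y g _ rfl h1 h2 h3, pv_B_norm r y g _ rfl h1 h2 h3]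
  refine pv_fin _ _ _ ?_ ?_ ?_ <;> (unfold pvClamp; omega)
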